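-- pv_equiv track=rewrite | github.com/meatsby/Algorithm | bootcampprep/wtc4/1.py | solution
-- ===== SOURCE A (Python) =====
-- def solution(arr):
--     answer = []
--     l = [0, 0, 0]
--
--     for a in arr:
--         if a == 1:
--             l[0] += 1
--         elif a == 2:
--             l[1] += 1
--         elif a == 3:
--             l[2] += 1
--
--     for i in l:
--         answer.append(max(l) - i)
--
--     return answer
-- ===== SOURCE B (Python) =====
-- def solution(arr):
--     # Sort the relevant elements, then locate the 1/2/3 boundaries by binary search:
--     # the run lengths between boundaries are the three tallies.
--     s = sorted(x for x in arr if x in (1, 2, 3))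
--
--     def lower(t):  # first index i with s[i] >= t (hand-written bisect_left)
--         lo, hi = 0, len(s)
--         while lo < hi:
--             mid = (lo + hi) // 2
--             if s[mid] < t:
--                 lo = mid + 1
--             else:
--                 hi = mid
--         return lo
--
--     b2, b3 = lower(2), lower(3)
--     counts = [b2, b3 - b2, len(s) - b3]
--     m = max(counts)
--     return [m - c for c in counts]
-- ===== Notes on version B (the rewrite author's own statement) =====
-- stated objective: alternative
-- what changed: Instead of tallying with a branching accumulator loop, B sorts the elements equal to 1/2/3 and recovers the three tallies as run lengths between boundaries found by hand-written binary search (bisect_left), then subtracts each from the max.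
import Mathlib
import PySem

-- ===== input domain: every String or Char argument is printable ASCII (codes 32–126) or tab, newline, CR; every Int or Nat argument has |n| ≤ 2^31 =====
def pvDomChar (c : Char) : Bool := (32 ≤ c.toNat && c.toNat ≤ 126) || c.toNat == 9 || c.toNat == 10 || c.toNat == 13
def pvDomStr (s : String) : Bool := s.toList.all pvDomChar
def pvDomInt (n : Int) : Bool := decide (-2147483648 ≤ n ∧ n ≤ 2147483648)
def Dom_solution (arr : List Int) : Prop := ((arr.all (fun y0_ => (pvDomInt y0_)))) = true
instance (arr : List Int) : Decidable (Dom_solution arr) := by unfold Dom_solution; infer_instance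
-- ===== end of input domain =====

-- B recovers the three tallies by sorting the 1/2/3 elements and binary-searching the
-- boundaries (run lengths), instead of A's branching accumulator loop; objective: alternative.

-- ===== PORT A =====
-- literal port of A's loop: state is the 3-slot tally list, branches in source order
def solution (arr : List Int) : List Int :=
  let l := arr.foldl (fun (l : Int × Int × Int) a =>
    if a == 1 then (l.1 + 1, l.2.1, l.2.2)
    else if a == 2 then (l.1, l.2.1 + 1, l.2.2)
    else if a == 3 then (l.1, l.2.1, l.2.2 + 1)
    else l) (0, 0, 0)
  let ll := [l.1, l.2.1, l.2.2]
  ll.foldl (fun answer i => answer ++ [max l.1 (max l.2.1 l.2.2) - i]) []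

-- ===== PORT B =====
-- the while-loop of Source B's hand-written bisect_left; indices are nonnegative throughout in
-- Python, so Nat indices and Nat division are exact here; s[mid] is in range (mid < hi ≤ len)
def lowerLoop (s : List Int) (t : Int) (lo hi : Nat) : Nat :=
  if lo < hi then
    let mid := (lo + hi) / 2
    if s[mid]! < t then lowerLoop s t (mid + 1) hi
    else lowerLoop s t lo mid
  else lo
termination_by hi - lo
decreasing_by all_goals omega

def solution_alt (arr : List Int) : List Int :=
  let s := PySem.List.sorted (arr.filter (fun x => x == 1 || x == 2 || x == 3)) (fun x => x) false
  let b2 := lowerLoop s 2 0 s.length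
  let b3 := lowerLoop s 3 0 s.length
  let counts : List Int := [(b2 : Int), (b3 : Int) - (b2 : Int), (s.length : Int) - (b3 : Int)]
  let m := max counts[0]! (max counts[1]! counts[2]!)
  counts.map (fun c => m - c)

-- ===== PRECONDITION & SPEC =====
def Spec_solution (arr : List Int) (out : List Int) : Prop := out = solution_alt arr
instance (arr : List Int) (out : List Int) : Decidable (Spec_solution arr out) := by unfold Spec_solution; infer_instance

-- ===== CLAIM =====
def Claim_equal_solution : Prop := ∀ (arr : List Int), Dom_solution arr → Spec_solution arr (solution arr)

-- ===== LEMMAS AND PROOFS =====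
theorem solution_foldl_counts (arr : List Int) (a b c : Int) :
    arr.foldl (fun (l : Int × Int × Int) a =>
      if a == 1 then (l.1 + 1, l.2.1, l.2.2)
      else if a == 2 then (l.1, l.2.1 + 1, l.2.2)
      else if a == 3 then (l.1, l.2.1, l.2.2 + 1)
      else l) (a, b, c)
    = (a + arr.count 1, b + arr.count 2, c + arr.count 3) := by
  induction arr generalizing a b c with
  | nil => simp
  | cons x xs ih =>
    simp only [beq_iff_eq] at ih
    simp only [List.foldl_cons, beq_iff_eq]
    split_ifs with h1 h2 h3
    · rw [ih]; simp [h1, Prod.ext_iff]; omega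
    · rw [ih]; simp [h2, Prod.ext_iff]; omega
    · rw [ih]; simp [h3, Prod.ext_iff]; omega
    · rw [ih]; simp [h1, h2, h3]

-- loop invariant of the binary search: everything left of the result is < t,
-- everything from the result on is ≥ t
theorem lowerLoop_inv (s : List Int) (t : Int) (lo hi : Nat)
    (hhi : hi ≤ s.length) (hlohi : lo ≤ hi)
    (hb : ∀ i, i < lo → s[i]! < t)
    (ha : ∀ i, hi ≤ i → i < s.length → t ≤ s[i]!)
    (hmono : ∀ i j, i ≤ j → j < s.length → s[i]! ≤ s[j]!) :
    (∀ i, i < lowerLoop s t lo hi → s[i]! < t) ∧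
    (∀ i, lowerLoop s t lo hi ≤ i → i < s.length → t ≤ s[i]!) ∧
    lowerLoop s t lo hi ≤ hi := by
  fun_induction lowerLoop s t lo hi with
  | case1 lo hi hlt mid hmid ih =>
    have hmlt : mid < hi := by omega
    obtain ⟨p1, p2, p3⟩ := ih (by omega) (by omega)
      (by
        intro i hi2
        rcases Nat.lt_or_ge i lo with h | h
        · exact hb i h
        · exact lt_of_le_of_lt (hmono i mid (by omega) (by omega)) hmid)
      ha
    exact ⟨p1, p2, by omega⟩
  | case2 lo hi hlt mid hmid ih =>
    have hmlt : mid < hi := by omega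
    obtain ⟨p1, p2, p3⟩ := ih (by omega) (by omega) hb
      (by
        intro i hmi hil
        exact le_trans (not_lt.mp hmid) (hmono mid i hmi hil))
    exact ⟨p1, p2, by omega⟩
  | case3 lo hi hlt =>
    have : lo = hi := by omega
    exact ⟨hb, by intro i h1 h2; exact ha i (by omega) h2, by omega⟩

-- a position r that splits the list into p-true prefix and p-false suffix is the countP
theorem countP_eq_of_split (s : List Int) (p : Int → Bool) (r : Nat) (hr : r ≤ s.length)
    (h1 : ∀ i, i < r → p (s[i]!) = true)
    (h2 : ∀ i, r ≤ i → i < s.length → p (s[i]!) = false) :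
    s.countP p = r := by
  induction s generalizing r with
  | nil =>
    simp only [List.length_nil] at hr
    simp [Nat.le_zero.mp hr]
  | cons x xs ih =>
    cases r with
    | zero =>
      have hx : p x = false := by simpa using h2 0 (by omega) (by simp)
      have : xs.countP p = 0 := by
        refine ih 0 (by omega) (by intro i h; omega) ?_
        intro i _ hil
        simpa using h2 (i + 1) (by omega) (by simpa using hil)
      simp [hx, this]
    | succ k =>
      have hx : p x = true := by simpa using h1 0 (by omega)
      have : xs.countP p = k := by
        refine ih k (by simpa using hr) ?_ ?_
        · intro i h; simpa using h1 (i + 1) (by omega)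
        · intro i h hil; simpa using h2 (i + 1) (by omega) (by simpa using hil)
      simp [hx, this]

theorem lowerLoop_countP (s : List Int) (t : Int)
    (hmono : ∀ i j, i ≤ j → j < s.length → s[i]! ≤ s[j]!) :
    lowerLoop s t 0 s.length = s.countP (fun x => decide (x < t)) := by
  obtain ⟨h1, h2, h3⟩ := lowerLoop_inv s t 0 s.length (le_refl _) (Nat.zero_le _)
    (by intro i h; omega) (by intro i h1 h2; omega) hmono
  exact (countP_eq_of_split s _ _ h3
    (by intro i h; simpa using h1 i h)
    (by intro i hr hl; simpa using h2 i hr hl)).symm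

theorem count12 (l : List Int) :
    l.countP (fun x => decide (x < 2) && (x == 1 || x == 2 || x == 3)) = l.count 1 := by
  induction l with
  | nil => simp
  | cons x xs ih =>
    simp only [List.countP_cons, List.count_cons, ih]
    by_cases h : x = 1 <;> simp [h] <;> omega

theorem count13 (l : List Int) :
    l.countP (fun x => decide (x < 3) && (x == 1 || x == 2 || x == 3)) = l.count 1 + l.count 2 := by
  induction l with
  | nil => simp
  | cons x xs ih =>
    simp only [List.countP_cons, List.count_cons, ih]
    by_cases h1 : x = 1 <;> by_cases h2 : x = 2 <;> simp [h1, h2] <;> omega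

theorem count123 (l : List Int) :
    l.countP (fun x => x == 1 || x == 2 || x == 3) = l.count 1 + l.count 2 + l.count 3 := by
  induction l with
  | nil => simp
  | cons x xs ih =>
    simp only [List.countP_cons, List.count_cons, ih]
    by_cases h1 : x = 1 <;> by_cases h2 : x = 2 <;> by_cases h3 : x = 3 <;>
      simp [h1, h2, h3] <;> omega

-- ===== VERDICT =====
theorem solution_spec : Claim_equal_solution := by
  intro arr _
  unfold Spec_solution solution solution_alt
  rw [solution_foldl_counts]
  set q : Int → Bool := fun x => x == 1 || x == 2 || x == 3 with hq
  set s := PySem.List.sorted (arr.filter q) (fun x => x) false with hs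
  have hperm : s.Perm (arr.filter q) := PySem.List.sorted_perm _ _ _
  have hmono : ∀ i j, i ≤ j → j < s.length → s[i]! ≤ s[j]! := by
    intro i j hij hj
    have hi : i < s.length := lt_of_le_of_lt hij hj
    rw [getElem!_pos s i hi, getElem!_pos s j hj]
    exact PySem.List.sorted_id_getElem_mono _ hij hj
  have hcp : ∀ t : Int, s.countP (fun x => decide (x < t)) =
      arr.countP (fun x => decide (x < t) && q x) := by
    intro t
    rw [hperm.countP_eq, List.countP_filter]
  have hb2 : lowerLoop s 2 0 s.length = arr.count 1 := by
    rw [lowerLoop_countP s 2 hmono, hcp, hq]; exact count12 arr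
  have hb3 : lowerLoop s 3 0 s.length = arr.count 1 + arr.count 2 := by
    rw [lowerLoop_countP s 3 hmono, hcp, hq]; exact count13 arr
  have hlen : s.length = arr.count 1 + arr.count 2 + arr.count 3 := by
    rw [hperm.length_eq, ← List.countP_eq_length_filter, hq]; exact count123 arr
  simp only [List.foldl, List.map, List.getElem!_cons_zero, List.getElem!_cons_succ]
  rw [hb2, hb3, hlen]
  simp only [List.nil_append, List.cons_append, List.cons.injEq, and_true]
  refine ⟨?_, ?_, ?_⟩ <;> push_cast <;> omega
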